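-- pv_equiv track=rewrite | github.com/Mart1n66/school | python/fundamentals/matice.9.py | F
-- ===== SOURCE A (Python) =====
-- def F(A):
--     zoznam = []
--     for j in range(len(A[0])):
--         sucet = 0
--         for i in range(len(A)):
--             sucet += A[i][j]
--         zoznam.append(sucet)
--     for i in zoznam:
--         if zoznam.count(i) > 1:
--             return True
--     return False
-- ===== SOURCE B (Python) =====
-- def F(A):
--     zoznam = [sum(row[j] for row in A) for j in range(len(A[0]))]
--     s = sorted(zoznam)
--     return any(s[i] == s[i + 1] for i in range(len(s) - 1))
-- ===== Notes on version B (the rewrite author's own statement) =====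
-- stated objective: idiomatic
-- what changed: Column sums are built by a sum-over-rows comprehension instead of index-accumulator loops, and a repeated sum is detected by sorting once and any()-scanning adjacent pairs instead of a full list.count scan per element.
import Mathlib
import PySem

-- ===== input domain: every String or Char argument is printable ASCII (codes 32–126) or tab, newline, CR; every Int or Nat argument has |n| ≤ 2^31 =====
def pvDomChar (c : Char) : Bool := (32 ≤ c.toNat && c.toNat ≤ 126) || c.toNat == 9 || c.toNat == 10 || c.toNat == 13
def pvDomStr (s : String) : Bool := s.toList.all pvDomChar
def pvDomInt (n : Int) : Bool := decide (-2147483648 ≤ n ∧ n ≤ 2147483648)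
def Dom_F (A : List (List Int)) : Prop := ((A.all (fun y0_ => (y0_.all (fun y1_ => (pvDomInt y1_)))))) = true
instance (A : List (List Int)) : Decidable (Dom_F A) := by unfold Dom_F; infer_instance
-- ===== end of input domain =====

-- B builds the column sums by a sum-over-rows comprehension and detects a repeated sum by
-- sorting once and scanning adjacent pairs, instead of a full list.count scan per element.

-- ===== PORT A =====
def F (A : List (List Int)) : Bool :=
  let zoznam := (PySem.List.pyRange 0 ((PySem.List.pyGetD A 0 []).length : Int) 1).foldl
    (fun z j =>
      z ++ [(PySem.List.pyRange 0 (A.length : Int) 1).foldl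
        (fun s i => s + PySem.List.pyGetD (PySem.List.pyGetD A i []) j 0) 0])
    []
  zoznam.any (fun i => decide (1 < zoznam.count i))

-- ===== PORT B =====
def F_alt (A : List (List Int)) : Bool :=
  let zoznam := (PySem.List.pyRange 0 ((PySem.List.pyGetD A 0 []).length : Int) 1).map
    (fun j => (A.map (fun row => PySem.List.pyGetD row j 0)).sum)
  let s := PySem.List.sorted zoznam (fun x => x) false
  (PySem.List.pyRange 0 ((s.length : Int) - 1) 1).any
    (fun i => PySem.List.pyGetD s i 0 == PySem.List.pyGetD s (i + 1) 0)

-- ===== PRECONDITION & SPEC =====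
-- Pre_ excludes inputs on which the Python A raises an IndexError: the empty matrix
-- (A[0] raises) and matrices with a row shorter than the first row (A[i][j] raises).
def Pre_F (A : List (List Int)) : Prop :=
  A ≠ [] ∧ ∀ r ∈ A, (PySem.List.pyGetD A 0 []).length ≤ r.length
instance (A : List (List Int)) : Decidable (Pre_F A) := by unfold Pre_F; infer_instance

def pvWitness_F : List (List Int) := [[1, 2], [3, 4]]

def Spec_F (A : List (List Int)) (out : Bool) : Prop := out = F_alt A
instance (A : List (List Int)) (out : Bool) : Decidable (Spec_F A out) := by unfold Spec_F; infer_instance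

-- ===== CLAIM (what is proved, stated in full; the proofs are below) =====
def Claim_equal_F : Prop := ∀ (A : List (List Int)), Dom_F A → Pre_F A → Spec_F A (F A)

-- ===== LEMMAS AND PROOFS =====

-- A's duplicate check: some element has count > 1 iff the list is not Nodup
theorem pv_count_dup (z : List Int) :
    ((z.any fun i => decide (1 < z.count i)) = true) ↔ ¬ z.Nodup := by
  rw [List.any_eq_true]
  constructor
  · rintro ⟨x, _, hc⟩
    simp only [decide_eq_true_eq] at hc
    intro hnd
    exact absurd (List.nodup_iff_count_le_one.1 hnd x) (by omega)
  · intro hnd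
    rcases not_forall.1 (fun h => hnd (List.nodup_iff_count_le_one.2 h)) with ⟨x, hx⟩
    refine ⟨x, List.count_pos_iff.1 (by omega), by simp; omega⟩

-- in a (·≤·)-pairwise list, an equal adjacent pair exists iff the list is not Nodup
theorem pv_adj_dup (s : List Int) (hp : s.Pairwise (· ≤ ·)) :
    (∃ k : Nat, k + 1 < s.length ∧ s.getD k 0 = s.getD (k + 1) 0) ↔ ¬ s.Nodup := by
  induction s with
  | nil => simp
  | cons a tl ih =>
    cases tl with
    | nil => simp
    | cons b t =>
      have hp' : (b :: t).Pairwise (· ≤ ·) := hp.of_cons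
      have hab : a ≤ b := (List.pairwise_cons.1 hp).1 b (by simp)
      constructor
      · rintro ⟨k, hk, he⟩
        cases k with
        | zero =>
          simp only [List.getD_cons_zero, List.getD_cons_succ] at he
          intro hnd
          exact (List.nodup_cons.1 hnd).1 (by simp [he])
        | succ j =>
          have hnt : ¬ (b :: t).Nodup :=
            (ih hp').1 ⟨j, by simpa using hk, by simpa using he⟩
          intro hnd
          exact hnt hnd.of_cons
      · intro hnd
        by_cases hmem : a ∈ b :: t
        · have hba : a = b := by
            rcases List.mem_cons.1 hmem with h | h
            · exact h
            · exact le_antisymm hab ((List.pairwise_cons.1 hp').1 a h)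
          exact ⟨0, by simp, by simp [hba]⟩
        · have hnt : ¬ (b :: t).Nodup := by
            intro h
            exact hnd (List.nodup_cons.2 ⟨hmem, h⟩)
          rcases (ih hp').2 hnt with ⟨j, hj, he⟩
          exact ⟨j + 1, by simpa using hj, by simpa using he⟩

-- B's range loop over the sorted list, restated with Nat indices
theorem pv_alt_any (s : List Int) :
    (((PySem.List.pyRange 0 ((s.length : Int) - 1) 1).any
      (fun i => PySem.List.pyGetD s i 0 == PySem.List.pyGetD s (i + 1) 0)) = true)
    ↔ ∃ k : Nat, k + 1 < s.length ∧ s.getD k 0 = s.getD (k + 1) 0 := by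
  rw [List.any_eq_true]
  constructor
  · rintro ⟨i, hi, he⟩
    rw [PySem.List.mem_pyRange_one] at hi
    obtain ⟨hi0, hilt⟩ := hi
    lift i to ℕ using hi0 with k
    refine ⟨k, by omega, ?_⟩
    rw [beq_iff_eq, show ((k : Int) + 1) = ((k + 1 : Nat) : Int) from by push_cast; ring,
      PySem.List.pyGetD_natCast, PySem.List.pyGetD_natCast] at he
    exact he
  · rintro ⟨k, hk, he⟩
    refine ⟨(k : Int), PySem.List.mem_pyRange_one.2 ⟨by omega, by omega⟩, ?_⟩
    rw [beq_iff_eq, show ((k : Int) + 1) = ((k + 1 : Nat) : Int) from by push_cast; ring,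
      PySem.List.pyGetD_natCast, PySem.List.pyGetD_natCast]
    exact he

-- ===== VERDICT (by name: the statement is the Claim_ definition above) =====
-- A's append-accumulator double loop builds exactly B's comprehension list
theorem pv_sums_eq (A : List (List Int)) :
    ((PySem.List.pyRange 0 ((PySem.List.pyGetD A 0 []).length : Int) 1).foldl
      (fun z j =>
        z ++ [(PySem.List.pyRange 0 (A.length : Int) 1).foldl
          (fun s i => s + PySem.List.pyGetD (PySem.List.pyGetD A i []) j 0) 0])
      [])
    = (PySem.List.pyRange 0 ((PySem.List.pyGetD A 0 []).length : Int) 1).map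
        (fun j => (A.map (fun row => PySem.List.pyGetD row j 0)).sum) := by
  rw [PySem.List.foldl_append_singleton_eq_map]
  simp only [List.nil_append]
  refine List.map_congr_left (fun j _ => ?_)
  rw [PySem.List.foldl_pyRange_zero_pyGetD' A [] (fun s r => s + PySem.List.pyGetD r j 0) 0,
    PySem.List.foldl_add A (fun r => PySem.List.pyGetD r j 0) 0]
  simp

theorem F_spec : Claim_equal_F := by
  intro A _ _
  show F A = F_alt A
  unfold F F_alt
  rw [pv_sums_eq]
  set z := (PySem.List.pyRange 0 ((PySem.List.pyGetD A 0 []).length : Int) 1).map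
    (fun j => (A.map (fun row => PySem.List.pyGetD row j 0)).sum) with hz
  set s := PySem.List.sorted z (fun x => x) false with hs
  have hperm : s.Perm z := PySem.List.sorted_perm z (fun x => x) false
  have hpw : s.Pairwise (· ≤ ·) := by
    simpa using PySem.List.sorted_pairwise z (fun x => x)
  have h1 : ((z.any fun i => decide (1 < z.count i)) = true) ↔ ¬ z.Nodup := pv_count_dup z
  have h2 := (pv_alt_any s).trans ((pv_adj_dup s hpw).trans (not_congr hperm.nodup_iff))
  exact Bool.coe_iff_coe.mp (h1.trans h2.symm)
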